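-- pv_equiv track=rewrite | github.com/Huthayfa0/universal-puzzle-solver | solver/yin_yang_solver.py | _all_connected
-- ===== SOURCE A (Python) =====
-- from collections import deque
--
-- _D4 = [(0, 1), (1, 0), (0, -1), (-1, 0)]
--
-- WHITE = 0
--
-- BLACK = 1
--
-- def _connected_count(board, height, width, color):
--     """Return the size of the connected component of `color` containing (start_r, start_c).
--     If no cell has that color, return 0. Uses BFS from first cell of that color.
--     """
--     start = None
--     total = 0
--     for r in range(height):
--         for c in range(width):
--             if board[r][c] == color:
--                 total += 1
--                 if start is None:
--                     start = (r, c)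
--     if start is None or total == 0:
--         return 0
--
--     visited = [[False] * width for _ in range(height)]
--     q = deque([start])
--     visited[start[0]][start[1]] = True
--     reached = 1
--     while q:
--         r, c = q.popleft()
--         for dr, dc in _D4:
--             nr, nc = r + dr, c + dc
--             if 0 <= nr < height and 0 <= nc < width and board[nr][nc] == color and not visited[nr][nc]:
--                 visited[nr][nc] = True
--                 reached += 1
--                 q.append((nr, nc))
--     return reached
--
-- def _all_connected(board, height, width):
--     """Return True iff all black cells form one component and all white cells form one component."""
--     black_ok = _connected_count(board, height, width, BLACK) == sum(
--         1 for r in range(height) for c in range(width) if board[r][c] == BLACK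
--     )
--     white_ok = _connected_count(board, height, width, WHITE) == sum(
--         1 for r in range(height) for c in range(width) if board[r][c] == WHITE
--     )
--     return black_ok and white_ok
-- ===== SOURCE B (Python) =====
-- def _color_ok(board, height, width, color):
--     cells = [(r, c) for r in range(height) for c in range(width) if board[r][c] == color]
--     if not cells:
--         return True
--     marked = {cells[0]}
--     for _ in range(len(cells)):
--         for (r, c) in cells:
--             if (r - 1, c) in marked or (r + 1, c) in marked or (r, c - 1) in marked or (r, c + 1) in marked:
--                 marked.add((r, c))
--     return len(marked) == len(cells)
--
-- def _all_connected(board, height, width):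
--     return _color_ok(board, height, width, 1) and _color_ok(board, height, width, 0)
-- ===== Notes on version B (the rewrite author's own statement) =====
-- stated objective: alternative
-- what changed: Replaces the per-color BFS flood fill (deque + visited grid, reached-vs-total comparison) by a label-propagation fixpoint: collect the color's cells once, then repeatedly mark every cell 4-adjacent to a marked cell and compare the saturated marked set's size with the cell count.
import Mathlib
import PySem

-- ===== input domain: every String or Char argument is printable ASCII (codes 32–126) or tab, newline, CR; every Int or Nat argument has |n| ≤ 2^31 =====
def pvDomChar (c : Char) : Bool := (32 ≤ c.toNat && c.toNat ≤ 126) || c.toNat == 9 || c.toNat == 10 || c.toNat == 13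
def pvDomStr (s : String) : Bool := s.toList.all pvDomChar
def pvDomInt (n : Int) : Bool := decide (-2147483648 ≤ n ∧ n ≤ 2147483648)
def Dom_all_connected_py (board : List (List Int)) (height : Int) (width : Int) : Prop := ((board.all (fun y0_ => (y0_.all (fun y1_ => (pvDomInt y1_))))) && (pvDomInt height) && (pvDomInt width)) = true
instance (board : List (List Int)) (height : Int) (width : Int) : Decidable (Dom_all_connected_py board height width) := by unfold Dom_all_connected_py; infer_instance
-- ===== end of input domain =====

-- B replaces A's BFS-per-color connectivity test by a label-propagation saturation: it collects the
-- color's cells once and repeatedly marks cells 4-adjacent to a marked cell; objective: alternative.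

-- ===== PORT A =====

-- board[r][c]; every access A performs is in range under Pre_, where getD equals Python's indexing
def pvCell (board : List (List Int)) (r c : Int) : Int :=
  PySem.List.pyGetD (PySem.List.pyGetD board r []) c 0

def pvD4 : List (Int × Int) := [(0, 1), (1, 0), (0, -1), (-1, 0)]

-- first double loop of _connected_count: (start, total)
def pvScan (board : List (List Int)) (height width color : Int) : Option (Int × Int) × Int :=
  (PySem.List.pyRange 0 height 1).foldl (fun acc r =>
    (PySem.List.pyRange 0 width 1).foldl (fun acc c =>
      if pvCell board r c == color then
        ((match acc.1 with | none => some (r, c) | some s => some s), acc.2 + 1)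
      else acc) acc) (none, 0)

-- visited[r][c] (reads/writes A performs are in range, nonnegative indices)
def pvVGet (v : List (List Bool)) (r c : Int) : Bool := (v.getD r.toNat []).getD c.toNat false
def pvVSet (v : List (List Bool)) (r c : Int) : List (List Bool) :=
  v.set r.toNat ((v.getD r.toNat []).set c.toNat true)

-- body of A's `for dr, dc in _D4`; state = (visited, q, reached)
def pvBfsBody (board : List (List Int)) (height width color r c : Int)
    (st : List (List Bool) × List (Int × Int) × Int) (d : Int × Int) :
    List (List Bool) × List (Int × Int) × Int :=
  let nr := r + d.1
  let nc := c + d.2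
  if 0 ≤ nr ∧ nr < height ∧ 0 ≤ nc ∧ nc < width ∧ pvCell board nr nc = color ∧
      pvVGet st.1 nr nc = false then
    (pvVSet st.1 nr nc, st.2.1 ++ [(nr, nc)], st.2.2 + 1)
  else st

-- A's `while q` loop; the fuel only makes the recursion structural, it is never exhausted (proved)
def pvBfsLoop (board : List (List Int)) (height width color : Int) :
    Nat → List (List Bool) → List (Int × Int) → Int → Int
  | _, _, [], reached => reached
  | 0, _, _ :: _, reached => reached
  | fuel + 1, v, (r, c) :: rest, reached =>
      let st := pvD4.foldl (pvBfsBody board height width color r c) (v, rest, reached)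
      pvBfsLoop board height width color fuel st.1 st.2.1 st.2.2

def pvConnectedCount (board : List (List Int)) (height width color : Int) : Int :=
  let sc := pvScan board height width color
  match sc.1 with
  | none => 0
  | some s =>
      if sc.2 = 0 then 0
      else
        let visited : List (List Bool) :=
          List.replicate height.toNat (List.replicate width.toNat false)
        let visited := pvVSet visited s.1 s.2
        pvBfsLoop board height width color (sc.2.toNat + 1) visited [s] 1

-- `sum(1 for r in range(height) for c in range(width) if board[r][c] == color)`
def pvColorSum (board : List (List Int)) (height width color : Int) : Int :=
  (PySem.List.pyRange 0 height 1).foldl (fun acc r =>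
    (PySem.List.pyRange 0 width 1).foldl (fun acc c =>
      if pvCell board r c == color then acc + 1 else acc) acc) 0

def all_connected_py (board : List (List Int)) (height : Int) (width : Int) : Bool :=
  let black_ok := pvConnectedCount board height width 1 == pvColorSum board height width 1
  let white_ok := pvConnectedCount board height width 0 == pvColorSum board height width 0
  black_ok && white_ok

-- ===== PORT B =====

-- `[(r, c) for r in range(height) for c in range(width) if board[r][c] == color]`
def pvCells (board : List (List Int)) (height width color : Int) : List (Int × Int) :=
  (PySem.List.pyRange 0 height 1).flatMap (fun r =>
    ((PySem.List.pyRange 0 width 1).filter (fun c => pvCell board r c == color)).map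
      (fun c => (r, c)))

-- inner `for (r, c) in cells: if <a 4-neighbour is marked>: marked.add((r, c))`
def pvRound (cells : List (Int × Int)) (marked : PySem.Set (Int × Int)) : PySem.Set (Int × Int) :=
  cells.foldl (fun m p =>
    if (p.1 - 1, p.2) ∈ m ∨ (p.1 + 1, p.2) ∈ m ∨ (p.1, p.2 - 1) ∈ m ∨ (p.1, p.2 + 1) ∈ m
    then PySem.Set.add m p else m) marked

def pvColorOk (board : List (List Int)) (height width color : Int) : Bool :=
  let cells := pvCells board height width color
  match cells with
  | [] => true
  | s :: _ =>
      let marked : PySem.Set (Int × Int) := PySem.Set.add PySem.Set.empty s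
      let marked := (List.range cells.length).foldl (fun m _ => pvRound cells m) marked
      marked.length == cells.length

def all_connected_py_alt (board : List (List Int)) (height : Int) (width : Int) : Bool :=
  pvColorOk board height width 1 && pvColorOk board height width 0

-- ===== PRECONDITION & SPEC =====
-- Pre_ excludes exactly the inputs where A's `board[r][c]` raises IndexError: a positive height/width
-- grid claim that the nested `board` lists do not actually provide.
def Pre_all_connected_py (board : List (List Int)) (height : Int) (width : Int) : Prop :=
  0 < height → 0 < width →
    height ≤ (board.length : Int) ∧ ∀ row ∈ board.take height.toNat, width ≤ (row.length : Int)
instance (board : List (List Int)) (height : Int) (width : Int) : Decidable (Pre_all_connected_py board height width) := by unfold Pre_all_connected_py; infer_instance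

def pvWitness_all_connected_py : List (List Int) × Int × Int := ([[1, 0], [1, 0]], 2, 2)

def Spec_all_connected_py (board : List (List Int)) (height : Int) (width : Int) (out : Bool) : Prop := out = all_connected_py_alt board height width
instance (board : List (List Int)) (height : Int) (width : Int) (out : Bool) : Decidable (Spec_all_connected_py board height width out) := by unfold Spec_all_connected_py; infer_instance

-- ===== CLAIM (what is proved, stated in full; the proofs are below) =====
def Claim_equal_all_connected_py : Prop := ∀ (board : List (List Int)) (height : Int) (width : Int), Dom_all_connected_py board height width → Pre_all_connected_py board height width → Spec_all_connected_py board height width (all_connected_py board height width)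

-- ===== LEMMAS AND PROOFS =====

-- ---- proof-side notions: the cell graph of one color ----

def pvAdj (bo : List (List Int)) (ht wd co : Int) (p q : Int × Int) : Prop :=
  p ∈ pvCells bo ht wd co ∧ q ∈ pvCells bo ht wd co ∧
    ((q.1 = p.1 ∧ (q.2 = p.2 + 1 ∨ q.2 = p.2 - 1)) ∨
     (q.2 = p.2 ∧ (q.1 = p.1 + 1 ∨ q.1 = p.1 - 1)))

def pvReach (bo : List (List Int)) (ht wd co : Int) (s p : Int × Int) : Prop :=
  Relation.ReflTransGen (pvAdj bo ht wd co) s p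

def pvVisT (ht wd : Int) (v : List (List Bool)) (p : Int × Int) : Prop :=
  0 ≤ p.1 ∧ p.1 < ht ∧ 0 ≤ p.2 ∧ p.2 < wd ∧ pvVGet v p.1 p.2 = true

def pvShape (ht wd : Int) (v : List (List Bool)) : Prop :=
  v.length = ht.toNat ∧ ∀ row ∈ v, row.length = wd.toNat

def pvVisLen (bo : List (List Int)) (ht wd co : Int) (v : List (List Bool)) : Nat :=
  ((pvCells bo ht wd co).filter (fun p => pvVGet v p.1 p.2)).length

def pvUnvisLen (bo : List (List Int)) (ht wd co : Int) (v : List (List Bool)) : Nat :=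
  ((pvCells bo ht wd co).filter (fun p => !pvVGet v p.1 p.2)).length

-- ---- the cell list ----

theorem pv_mem_cells (bo : List (List Int)) (ht wd co : Int) (p : Int × Int) :
    p ∈ pvCells bo ht wd co ↔
      0 ≤ p.1 ∧ p.1 < ht ∧ 0 ≤ p.2 ∧ p.2 < wd ∧ pvCell bo p.1 p.2 = co := by
  obtain ⟨r, c⟩ := p
  simp [pvCells, List.mem_flatMap, List.mem_filter, List.mem_map,
    PySem.List.mem_pyRange_one]
  tauto

theorem pv_nodup_cells (bo : List (List Int)) (ht wd co : Int) :
    (pvCells bo ht wd co).Nodup := by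
  unfold pvCells
  rw [List.nodup_flatMap]
  constructor
  · intro r _
    exact ((PySem.List.nodup_pyRange_one 0 wd).filter _).map
      (fun a b h => by simpa using congrArg Prod.snd h)
  · have h := PySem.List.pairwise_lt_pyRange_one 0 ht
    refine h.imp ?_
    intro a b hab x hxa hxb
    simp [List.mem_map, List.mem_filter] at hxa hxb
    obtain ⟨ca, _, hca⟩ := hxa
    obtain ⟨cb, _, hcb⟩ := hxb
    have : a = b := by
      have := congrArg Prod.fst hca
      have := congrArg Prod.fst hcb
      simp at *
      omega
    omega

theorem pv_reach_mem (bo : List (List Int)) (ht wd co : Int) (s p : Int × Int)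
    (hs : s ∈ pvCells bo ht wd co) (h : pvReach bo ht wd co s p) :
    p ∈ pvCells bo ht wd co := by
  induction h with
  | refl => exact hs
  | tail _ hadj _ => exact hadj.2.1

theorem pv_adj_of_d (bo : List (List Int)) (ht wd co : Int) (p q d : Int × Int)
    (hd : d ∈ pvD4) (hp : p ∈ pvCells bo ht wd co) (hq : q ∈ pvCells bo ht wd co)
    (he : q = (p.1 + d.1, p.2 + d.2)) : pvAdj bo ht wd co p q := by
  refine ⟨hp, hq, ?_⟩
  subst he
  simp [pvD4] at hd
  rcases hd with h | h | h | h <;> subst h <;> simp <;> omega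

theorem pv_adj_to_d (bo : List (List Int)) (ht wd co : Int) (p q : Int × Int)
    (h : pvAdj bo ht wd co p q) : ∃ d ∈ pvD4, q = (p.1 + d.1, p.2 + d.2) := by
  obtain ⟨_, _, hgeo⟩ := h
  obtain ⟨a, b⟩ := q
  rcases hgeo with ⟨h1, h2 | h2⟩ | ⟨h1, h2 | h2⟩
  · exact ⟨(0, 1), by simp [pvD4], by simp_all⟩
  · exact ⟨(0, -1), by simp [pvD4], by simp_all; omega⟩
  · exact ⟨(1, 0), by simp [pvD4], by simp_all⟩
  · exact ⟨(-1, 0), by simp [pvD4], by simp_all; omega⟩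

theorem pv_adj_nbr (bo : List (List Int)) (ht wd co : Int) (p q : Int × Int)
    (h : pvAdj bo ht wd co q p) :
    q = (p.1 - 1, p.2) ∨ q = (p.1 + 1, p.2) ∨ q = (p.1, p.2 - 1) ∨ q = (p.1, p.2 + 1) := by
  obtain ⟨_, _, hgeo⟩ := h
  obtain ⟨a, b⟩ := q
  simp only [Prod.mk.injEq]
  rcases hgeo with ⟨h1, h2 | h2⟩ | ⟨h1, h2 | h2⟩ <;> simp_all

theorem pv_adj_from_nbr (bo : List (List Int)) (ht wd co : Int) (p q : Int × Int)
    (hp : p ∈ pvCells bo ht wd co) (hq : q ∈ pvCells bo ht wd co)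
    (h : q = (p.1 - 1, p.2) ∨ q = (p.1 + 1, p.2) ∨ q = (p.1, p.2 - 1) ∨ q = (p.1, p.2 + 1)) :
    pvAdj bo ht wd co q p := by
  refine ⟨hq, hp, ?_⟩
  rcases h with rfl | rfl | rfl | rfl
  · simp
  · simp
  · simp
  · simp

-- ---- A's first double loop and the per-color sum ----

def pvPairs (ht wd : Int) : List (Int × Int) :=
  (PySem.List.pyRange 0 ht 1).flatMap (fun r =>
    (PySem.List.pyRange 0 wd 1).map (fun c => (r, c)))

theorem pv_double_foldl {σ : Type} (f : σ → Int → Int → σ) (rows cols : List Int)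
    (init : σ) :
    rows.foldl (fun acc r => cols.foldl (fun acc c => f acc r c) acc) init
      = (rows.flatMap (fun r => cols.map (fun c => (r, c)))).foldl
          (fun acc p => f acc p.1 p.2) init := by
  induction rows generalizing init with
  | nil => rfl
  | cons r rt ih => simp [List.flatMap_cons, List.foldl_append, List.foldl_map, ih]

theorem pv_cells_eq (bo : List (List Int)) (ht wd co : Int) :
    pvCells bo ht wd co = (pvPairs ht wd).filter (fun p => pvCell bo p.1 p.2 == co) := by
  unfold pvCells pvPairs
  rw [List.filter_flatMap]
  congr 1
  funext r
  rw [List.filter_map]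
  rfl

theorem pv_scanFold (L : List (Int × Int)) (P : Int × Int → Bool) (o : Option (Int × Int))
    (n : Int) :
    L.foldl (fun acc p => if P p then
        ((match acc.1 with | none => some p | some s => some s), acc.2 + 1) else acc) (o, n)
      = ((match o with | none => (L.filter P).head? | some s => some s),
         n + ((L.filter P).length : Int)) := by
  induction L generalizing o n with
  | nil => cases o <;> simp
  | cons a t ih =>
    by_cases hP : P a
    · cases o <;> simp only [List.foldl_cons, hP, if_pos, List.filter_cons_of_pos] <;>
        rw [ih] <;> simp <;> omega
    · cases o <;> simp only [List.foldl_cons, hP, Bool.false_eq_true, if_false] <;>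
        rw [ih] <;> simp [hP]

def pvScanStep (bo : List (List Int)) (co : Int) (acc : Option (Int × Int) × Int)
    (r c : Int) : Option (Int × Int) × Int :=
  if pvCell bo r c == co then
    ((match acc.1 with | none => some (r, c) | some s => some s), acc.2 + 1)
  else acc

theorem pv_scan_eq (bo : List (List Int)) (ht wd co : Int) :
    pvScan bo ht wd co
      = ((pvCells bo ht wd co).head?, ((pvCells bo ht wd co).length : Int)) := by
  show (PySem.List.pyRange 0 ht 1).foldl
      (fun acc r => (PySem.List.pyRange 0 wd 1).foldl
        (fun acc c => pvScanStep bo co acc r c) acc) (none, 0) = _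
  rw [pv_double_foldl (pvScanStep bo co)]
  have hP : (PySem.List.pyRange 0 ht 1).flatMap
      (fun r => (PySem.List.pyRange 0 wd 1).map (fun c => (r, c))) = pvPairs ht wd := rfl
  rw [hP]
  show (pvPairs ht wd).foldl
      (fun acc p => if (fun p : Int × Int => pvCell bo p.1 p.2 == co) p then
        ((match acc.1 with | none => some p | some s => some s), acc.2 + 1) else acc)
      (none, 0) = _
  rw [pv_scanFold (pvPairs ht wd) (fun p => pvCell bo p.1 p.2 == co) none 0,
    ← pv_cells_eq]
  simp

theorem pv_sum_eq (bo : List (List Int)) (ht wd co : Int) :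
    pvColorSum bo ht wd co = ((pvCells bo ht wd co).length : Int) := by
  unfold pvColorSum
  rw [pv_double_foldl (fun acc r c => if pvCell bo r c == co then acc + 1 else acc)]
  have hP : (PySem.List.pyRange 0 ht 1).flatMap
      (fun r => (PySem.List.pyRange 0 wd 1).map (fun c => (r, c))) = pvPairs ht wd := rfl
  rw [hP]
  show (pvPairs ht wd).foldl
      (fun acc p => if (fun p : Int × Int => pvCell bo p.1 p.2 == co) p then acc + 1
        else acc) 0 = _
  rw [PySem.List.foldl_count_if (fun p => pvCell bo p.1 p.2 == co) (pvPairs ht wd) 0,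
    List.countP_eq_length_filter, ← pv_cells_eq]
  simp

-- ---- reading and writing the visited grid ----

theorem pv_vget_replicate (n m : Nat) (r c : Int) :
    pvVGet (List.replicate n (List.replicate m false)) r c = false := by
  simp only [pvVGet, List.getD, List.getElem?_replicate]
  split_ifs <;> simp [List.getElem?_replicate]
  split_ifs <;> simp

theorem pv_shape_vset (ht wd : Int) (v : List (List Bool)) (r c : Int)
    (hs : pvShape ht wd v) : pvShape ht wd (pvVSet v r c) := by
  obtain ⟨hlen, hrow⟩ := hs
  unfold pvVSet
  by_cases hr : r.toNat < v.length
  · refine ⟨by simpa using hlen, ?_⟩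
    intro row hm
    rcases List.mem_or_eq_of_mem_set hm with h | h
    · exact hrow row h
    · subst h
      rw [List.getD_eq_getElem _ _ hr]
      simpa using hrow _ (List.getElem_mem hr)
  · rw [List.set_eq_of_length_le (Nat.le_of_not_lt hr)]
    exact ⟨hlen, hrow⟩

theorem pv_vget_vset (ht wd : Int) (v : List (List Bool)) (hs : pvShape ht wd v)
    (r c r' c' : Int) (hr1 : 0 ≤ r) (hr2 : r < ht) (hc1 : 0 ≤ c) (hc2 : c < wd)
    (hr1' : 0 ≤ r') (hr2' : r' < ht) (hc1' : 0 ≤ c') (_hc2' : c' < wd) :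
    pvVGet (pvVSet v r c) r' c'
      = if r' = r ∧ c' = c then true else pvVGet v r' c' := by
  obtain ⟨hlen, hrow⟩ := hs
  have hrn : r.toNat < v.length := by omega
  have hsome : v[r.toNat]? = some v[r.toNat] := List.getElem?_eq_getElem hrn
  have hcl : c.toNat < (v[r.toNat]).length := by
    rw [hrow _ (List.getElem_mem hrn)]; omega
  simp only [pvVGet, pvVSet, List.getD]
  by_cases he : r' = r
  · subst he
    rw [List.getElem?_set_self hrn, hsome]
    simp only [Option.getD_some]
    by_cases hce : c' = c
    · subst hce
      rw [List.getElem?_set_self hcl]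
      simp
    · have hcn : c.toNat ≠ c'.toNat := by omega
      rw [if_neg (by tauto), List.getElem?_set_ne hcn]
  · have hne : r.toNat ≠ r'.toNat := by omega
    rw [if_neg (by tauto), List.getElem?_set_ne hne]

-- ---- counting under a one-point update of the predicate ----

theorem pv_filter_flip (l : List (Int × Int)) (hl : l.Nodup) (p : Int × Int) (hp : p ∈ l)
    (g g' : Int × Int → Bool) (hsame : ∀ x ∈ l, x ≠ p → g' x = g x)
    (hgp : g p = false) (hgp' : g' p = true) :
    (l.filter g').length = (l.filter g).length + 1 ∧
      (l.filter (fun x => !g' x)).length + 1 = (l.filter (fun x => !g x)).length := by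
  induction l with
  | nil => cases hp
  | cons a t ih =>
    rcases List.mem_cons.mp hp with rfl | hpt
    · have hnt : p ∉ t := (List.nodup_cons.mp hl).1
      have h1 : t.filter g' = t.filter g :=
        List.filter_congr (fun x hx => hsame x (List.mem_cons_of_mem _ hx)
          (fun hxa => hnt (hxa ▸ hx)))
      have h2 : t.filter (fun x => !g' x) = t.filter (fun x => !g x) :=
        List.filter_congr (fun x hx => by
          rw [hsame x (List.mem_cons_of_mem _ hx) (fun hxa => hnt (hxa ▸ hx))])
      simp [hgp, hgp', h1, h2]
    · have hna : a ≠ p := fun h => (List.nodup_cons.mp hl).1 (h ▸ hpt)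
      obtain ⟨h1, h2⟩ := ih (List.nodup_cons.mp hl).2 hpt
        (fun x hx => hsame x (List.mem_cons_of_mem _ hx))
      have hga' : g' a = g a := hsame a List.mem_cons_self hna
      by_cases hga : g a = true
      · simp [hga, hga', h1, ← h2]
      · simp [hga, hga', h1, ← h2]

theorem pv_filter_singleton (l : List (Int × Int)) (hl : l.Nodup) (p : Int × Int)
    (hp : p ∈ l) (g : Int × Int → Bool) (hg : ∀ x ∈ l, (g x = true ↔ x = p)) :
    (l.filter g).length = 1 := by
  have heq : l.filter g = l.filter (fun x => x == p) :=
    List.filter_congr (fun x hx => by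
      by_cases he : x = p
      · subst he; simp [(hg x hx).mpr rfl]
      · have hf : g x = false := by
          rcases Bool.eq_false_or_eq_true (g x) with h | h
          · exact absurd ((hg x hx).mp h) he
          · exact h
        simp [hf, he])
  rw [heq, ← List.countP_eq_length_filter]
  have hc : l.countP (fun x => x == p) = l.count p := rfl
  rw [hc, List.count_eq_one_of_mem hl hp]

-- ---- the BFS loop invariant ----

structure PvMid (bo : List (List Int)) (ht wd co : Int) (s rc : Int × Int)
    (st : List (List Bool) × List (Int × Int) × Int) : Prop where
  shape : pvShape ht wd st.1
  start : pvVisT ht wd st.1 s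
  reach : ∀ p, pvVisT ht wd st.1 p → pvReach bo ht wd co s p
  qvis : ∀ p ∈ st.2.1, pvVisT ht wd st.1 p
  front : ∀ p, pvVisT ht wd st.1 p → p ∉ st.2.1 → p ≠ rc →
    ∀ p', pvAdj bo ht wd co p p' → pvVisT ht wd st.1 p'
  cnt : st.2.2 = (pvVisLen bo ht wd co st.1 : Int)
  rc_reach : pvReach bo ht wd co s rc

structure PvInv (bo : List (List Int)) (ht wd co : Int) (s : Int × Int)
    (v : List (List Bool)) (q : List (Int × Int)) (reached : Int) (fuel : Nat) : Prop where
  shape : pvShape ht wd v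
  start : pvVisT ht wd v s
  reach : ∀ p, pvVisT ht wd v p → pvReach bo ht wd co s p
  qvis : ∀ p ∈ q, pvVisT ht wd v p
  front : ∀ p, pvVisT ht wd v p → p ∉ q → ∀ p', pvAdj bo ht wd co p p' → pvVisT ht wd v p'
  cnt : reached = (pvVisLen bo ht wd co v : Int)
  fuel_ok : q.length + pvUnvisLen bo ht wd co v ≤ fuel

theorem pv_step (bo : List (List Int)) (ht wd co : Int) (s rc : Int × Int)
    (hs : s ∈ pvCells bo ht wd co) (d : Int × Int) (hd : d ∈ pvD4)
    (st : List (List Bool) × List (Int × Int) × Int)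
    (hm : PvMid bo ht wd co s rc st) :
    PvMid bo ht wd co s rc (pvBfsBody bo ht wd co rc.1 rc.2 st d) ∧
    (∀ p, pvVisT ht wd st.1 p → pvVisT ht wd (pvBfsBody bo ht wd co rc.1 rc.2 st d).1 p) ∧
    ((pvBfsBody bo ht wd co rc.1 rc.2 st d).2.1.length
        + pvUnvisLen bo ht wd co (pvBfsBody bo ht wd co rc.1 rc.2 st d).1
      ≤ st.2.1.length + pvUnvisLen bo ht wd co st.1) ∧
    ((rc.1 + d.1, rc.2 + d.2) ∈ pvCells bo ht wd co →
      pvVisT ht wd (pvBfsBody bo ht wd co rc.1 rc.2 st d).1 (rc.1 + d.1, rc.2 + d.2)) := by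
  obtain ⟨v, q, reached⟩ := st
  set pd : Int × Int := (rc.1 + d.1, rc.2 + d.2) with hpd
  unfold pvBfsBody
  simp only
  split_ifs with hg
  · -- the neighbour is a fresh in-range color cell: it is marked and enqueued
    obtain ⟨h1, h2, h3, h4, h5, h6⟩ := hg
    have hpdC : pd ∈ pvCells bo ht wd co :=
      (pv_mem_cells bo ht wd co pd).mpr ⟨h1, h2, h3, h4, h5⟩
    have hrcC : rc ∈ pvCells bo ht wd co := pv_reach_mem bo ht wd co s rc hs hm.rc_reach
    have hadj : pvAdj bo ht wd co rc pd := pv_adj_of_d bo ht wd co rc pd d hd hrcC hpdC rfl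
    have hrange := (pv_mem_cells bo ht wd co pd).mp hpdC
    have hsh := pv_shape_vset ht wd v pd.1 pd.2 hm.shape
    have hget : ∀ p : Int × Int, 0 ≤ p.1 → p.1 < ht → 0 ≤ p.2 → p.2 < wd →
        pvVGet (pvVSet v pd.1 pd.2) p.1 p.2
          = if p.1 = pd.1 ∧ p.2 = pd.2 then true else pvVGet v p.1 p.2 := by
      intro p ha hb hc hdd
      exact pv_vget_vset ht wd v hm.shape pd.1 pd.2 p.1 p.2
        hrange.1 hrange.2.1 hrange.2.2.1 hrange.2.2.2.1 ha hb hc hdd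
    have hvis' : ∀ p : Int × Int, pvVisT ht wd (pvVSet v pd.1 pd.2) p ↔
        (p = pd ∨ pvVisT ht wd v p) := by
      intro p
      constructor
      · rintro ⟨ha, hb, hc, hdd, he⟩
        rw [hget p ha hb hc hdd] at he
        split_ifs at he with hif
        · left; exact Prod.ext hif.1 hif.2
        · right; exact ⟨ha, hb, hc, hdd, he⟩
      · rintro (rfl | ⟨ha, hb, hc, hdd, he⟩)
        · refine ⟨hrange.1, hrange.2.1, hrange.2.2.1, hrange.2.2.2.1, ?_⟩
          rw [hget pd hrange.1 hrange.2.1 hrange.2.2.1 hrange.2.2.2.1]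
          simp
        · refine ⟨ha, hb, hc, hdd, ?_⟩
          rw [hget p ha hb hc hdd, he]
          split_ifs <;> rfl
    have hmono : ∀ p, pvVisT ht wd v p → pvVisT ht wd (pvVSet v pd.1 pd.2) p :=
      fun p hp => (hvis' p).mpr (Or.inr hp)
    have hpdvis : pvVisT ht wd (pvVSet v pd.1 pd.2) pd := (hvis' pd).mpr (Or.inl rfl)
    have hreach' : pvReach bo ht wd co s pd := hm.rc_reach.tail hadj
    have hcnt := pv_filter_flip (pvCells bo ht wd co) (pv_nodup_cells bo ht wd co) pd hpdC
      (fun p => pvVGet v p.1 p.2) (fun p => pvVGet (pvVSet v pd.1 pd.2) p.1 p.2)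
      (by
        intro x hx hxne
        have hr := (pv_mem_cells bo ht wd co x).mp hx
        show pvVGet (pvVSet v pd.1 pd.2) x.1 x.2 = pvVGet v x.1 x.2
        rw [hget x hr.1 hr.2.1 hr.2.2.1 hr.2.2.2.1, if_neg]
        intro hif
        exact hxne (Prod.ext hif.1 hif.2))
      h6 (by simpa using hpdvis.2.2.2.2)
    refine ⟨⟨hsh, hmono s hm.start, ?_, ?_, ?_, ?_, hm.rc_reach⟩, hmono, ?_, fun _ => hpdvis⟩
    · intro p hp
      rcases (hvis' p).mp hp with rfl | hp'
      · exact hreach'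
      · exact hm.reach p hp'
    · intro p hp
      rcases List.mem_append.mp hp with hp' | hp'
      · exact hmono p (hm.qvis p hp')
      · rcases List.mem_singleton.mp hp' with rfl
        exact hpdvis
    · intro p hp hnq hnrc p' hadj'
      have hppd : p ≠ pd := by
        intro hcon
        exact hnq (by simp [hcon]; exact Or.inr hpd)
      rcases (hvis' p).mp hp with rfl | hp'
      · exact absurd rfl hppd
      · exact hmono p' (hm.front p hp' (fun hin => hnq (List.mem_append_left _ hin)) hnrc p' hadj')
    · show reached + 1 = (pvVisLen bo ht wd co (pvVSet v pd.1 pd.2) : Int)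
      have hc0 : reached = (pvVisLen bo ht wd co v : Int) := hm.cnt
      unfold pvVisLen at hc0 ⊢
      rw [hcnt.1]
      push_cast
      omega
    · show (q ++ [pd]).length + pvUnvisLen bo ht wd co (pvVSet v pd.1 pd.2)
        ≤ q.length + pvUnvisLen bo ht wd co v
      unfold pvUnvisLen
      rw [List.length_append]
      have h2 : ((pvCells bo ht wd co).filter
            (fun p => !pvVGet (pvVSet v pd.1 pd.2) p.1 p.2)).length + 1
          = ((pvCells bo ht wd co).filter (fun p => !pvVGet v p.1 p.2)).length := by
        simpa using hcnt.2
      simp only [List.length_singleton]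
      omega
  · -- nothing happens
    refine ⟨⟨hm.shape, hm.start, hm.reach, hm.qvis, ?_, hm.cnt, hm.rc_reach⟩,
      fun p hp => hp, le_refl _, ?_⟩
    · intro p hp hnq hnrc p' hadj'
      exact hm.front p hp hnq hnrc p' hadj'
    · intro hC
      have hr := (pv_mem_cells bo ht wd co (rc.1 + d.1, rc.2 + d.2)).mp hC
      refine ⟨hr.1, hr.2.1, hr.2.2.1, hr.2.2.2.1, ?_⟩
      by_contra hfalse
      exact hg ⟨hr.1, hr.2.1, hr.2.2.1, hr.2.2.2.1, hr.2.2.2.2,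
        by simpa using hfalse⟩

theorem pv_bfs_done (bo : List (List Int)) (ht wd co : Int) (s : Int × Int)
    (hs : s ∈ pvCells bo ht wd co) (v : List (List Bool)) (reached : Int) (fuel : Nat)
    (inv : PvInv bo ht wd co s v [] reached fuel) :
    ∀ p, (p ∈ pvCells bo ht wd co ∧ pvVGet v p.1 p.2 = true) ↔ pvReach bo ht wd co s p := by
  intro p
  constructor
  · rintro ⟨hpC, hg⟩
    have hr := (pv_mem_cells bo ht wd co p).mp hpC
    exact inv.reach p ⟨hr.1, hr.2.1, hr.2.2.1, hr.2.2.2.1, hg⟩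
  · intro hre
    have hv : pvVisT ht wd v p := by
      induction hre with
      | refl => exact inv.start
      | tail hab hadj ihh => exact inv.front _ ihh (List.not_mem_nil) _ hadj
    exact ⟨pv_reach_mem bo ht wd co s p hs hre, hv.2.2.2.2⟩

theorem pv_bfs_run (bo : List (List Int)) (ht wd co : Int) (s : Int × Int)
    (hs : s ∈ pvCells bo ht wd co) :
    ∀ (fuel : Nat) (v : List (List Bool)) (q : List (Int × Int)) (reached : Int),
    PvInv bo ht wd co s v q reached fuel →
    ∃ vf, pvBfsLoop bo ht wd co fuel v q reached = (pvVisLen bo ht wd co vf : Int) ∧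
      (∀ p, (p ∈ pvCells bo ht wd co ∧ pvVGet vf p.1 p.2 = true)
        ↔ pvReach bo ht wd co s p) := by
  intro fuel
  induction fuel with
  | zero =>
    intro v q reached inv
    rcases q with _ | ⟨p0, rest⟩
    · refine ⟨v, ?_, pv_bfs_done bo ht wd co s hs v reached 0 inv⟩
      exact inv.cnt
    · have := inv.fuel_ok
      simp [List.length_cons] at this
  | succ fuel ih =>
    intro v q reached inv
    rcases q with _ | ⟨⟨r, c⟩, rest⟩
    · refine ⟨v, ?_, pv_bfs_done bo ht wd co s hs v reached (fuel + 1) inv⟩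
      exact inv.cnt
    · have hmid0 : PvMid bo ht wd co s (r, c) (v, rest, reached) :=
        { shape := inv.shape, start := inv.start, reach := inv.reach,
          qvis := fun p hp => inv.qvis p (List.mem_cons_of_mem _ hp),
          front := fun p hp hnr hne p' ha => inv.front p hp
            (fun hmem => by
              rcases List.mem_cons.mp hmem with h | h
              · exact hne h
              · exact hnr h) p' ha,
          cnt := inv.cnt,
          rc_reach := inv.reach _ (inv.qvis _ List.mem_cons_self) }
      obtain ⟨hm1, hmono1, hmu1, hc1⟩ := pv_step bo ht wd co s (r, c) hs (0, 1)
        (by simp [pvD4]) (v, rest, reached) hmid0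
      set st1 := pvBfsBody bo ht wd co (r, c).1 (r, c).2 (v, rest, reached) (0, 1) with hst1
      obtain ⟨hm2, hmono2, hmu2, hc2⟩ := pv_step bo ht wd co s (r, c) hs (1, 0)
        (by simp [pvD4]) st1 hm1
      set st2 := pvBfsBody bo ht wd co (r, c).1 (r, c).2 st1 (1, 0) with hst2
      obtain ⟨hm3, hmono3, hmu3, hc3⟩ := pv_step bo ht wd co s (r, c) hs (0, -1)
        (by simp [pvD4]) st2 hm2
      set st3 := pvBfsBody bo ht wd co (r, c).1 (r, c).2 st2 (0, -1) with hst3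
      obtain ⟨hm4, hmono4, hmu4, hc4⟩ := pv_step bo ht wd co s (r, c) hs (-1, 0)
        (by simp [pvD4]) st3 hm3
      set st4 := pvBfsBody bo ht wd co (r, c).1 (r, c).2 st3 (-1, 0) with hst4
      have inv' : PvInv bo ht wd co s st4.1 st4.2.1 st4.2.2 fuel :=
        { shape := hm4.shape, start := hm4.start, reach := hm4.reach, qvis := hm4.qvis,
          front := by
            intro p hp hnq p' hadj'
            by_cases hprc : p = (r, c)
            · obtain ⟨dd, hdd, hp'⟩ := pv_adj_to_d bo ht wd co p p' hadj'
              have hp'C : p' ∈ pvCells bo ht wd co := hadj'.2.1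
              rw [hprc] at hp'
              subst hp'
              simp [pvD4] at hdd
              rcases hdd with h | h | h | h
              · subst h; exact hmono4 _ (hmono3 _ (hmono2 _ (hc1 hp'C)))
              · subst h; exact hmono4 _ (hmono3 _ (hc2 hp'C))
              · subst h; exact hmono4 _ (hc3 hp'C)
              · subst h; exact hc4 hp'C
            · exact hm4.front p hp hnq hprc p' hadj',
          cnt := hm4.cnt,
          fuel_ok := by
            have h0 := inv.fuel_ok
            simp only [List.length_cons] at h0
            have : st4.2.1.length + pvUnvisLen bo ht wd co st4.1
                ≤ rest.length + pvUnvisLen bo ht wd co v := by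
              calc st4.2.1.length + pvUnvisLen bo ht wd co st4.1
                  ≤ st3.2.1.length + pvUnvisLen bo ht wd co st3.1 := hmu4
                _ ≤ st2.2.1.length + pvUnvisLen bo ht wd co st2.1 := hmu3
                _ ≤ st1.2.1.length + pvUnvisLen bo ht wd co st1.1 := hmu2
                _ ≤ rest.length + pvUnvisLen bo ht wd co v := hmu1
            omega }
      have hloop : pvBfsLoop bo ht wd co (fuel + 1) v ((r, c) :: rest) reached
          = pvBfsLoop bo ht wd co fuel st4.1 st4.2.1 st4.2.2 := rfl
      rw [hloop]
      exact ih st4.1 st4.2.1 st4.2.2 inv'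

theorem pv_shape_replicate (ht wd : Int) :
    pvShape ht wd (List.replicate ht.toNat (List.replicate wd.toNat false)) := by
  refine ⟨by simp, ?_⟩
  intro row hm
  rw [(List.mem_replicate.mp hm).2]
  simp

theorem pv_init (bo : List (List Int)) (ht wd co : Int) (s : Int × Int)
    (rest : List (Int × Int)) (hC : pvCells bo ht wd co = s :: rest) :
    PvInv bo ht wd co s
      (pvVSet (List.replicate ht.toNat (List.replicate wd.toNat false)) s.1 s.2)
      [s] 1 (rest.length + 2) := by
  have hs : s ∈ pvCells bo ht wd co := by rw [hC]; exact List.mem_cons_self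
  have hr := (pv_mem_cells bo ht wd co s).mp hs
  have hsh0 := pv_shape_replicate ht wd
  set v0 := pvVSet (List.replicate ht.toNat (List.replicate wd.toNat false)) s.1 s.2 with hv0
  have hget : ∀ p : Int × Int, 0 ≤ p.1 → p.1 < ht → 0 ≤ p.2 → p.2 < wd →
      pvVGet v0 p.1 p.2 = if p.1 = s.1 ∧ p.2 = s.2 then true else false := by
    intro p ha hb hc hd
    rw [hv0, pv_vget_vset ht wd _ hsh0 s.1 s.2 p.1 p.2
      hr.1 hr.2.1 hr.2.2.1 hr.2.2.2.1 ha hb hc hd, pv_vget_replicate]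
  have hvis : ∀ p : Int × Int, pvVisT ht wd v0 p ↔ p = s := by
    intro p
    constructor
    · rintro ⟨ha, hb, hc, hd, he⟩
      rw [hget p ha hb hc hd] at he
      split_ifs at he with hif
      exact Prod.ext hif.1 hif.2
    · rintro rfl
      refine ⟨hr.1, hr.2.1, hr.2.2.1, hr.2.2.2.1, ?_⟩
      rw [hget p hr.1 hr.2.1 hr.2.2.1 hr.2.2.2.1]
      simp
  have hcnt1 : pvVisLen bo ht wd co v0 = 1 := by
    apply pv_filter_singleton (pvCells bo ht wd co) (pv_nodup_cells bo ht wd co) s hs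
    intro x hx
    have hxr := (pv_mem_cells bo ht wd co x).mp hx
    rw [hget x hxr.1 hxr.2.1 hxr.2.2.1 hxr.2.2.2.1]
    constructor
    · intro hh
      split_ifs at hh with hif
      exact Prod.ext hif.1 hif.2
    · rintro rfl
      simp
  refine ⟨pv_shape_vset ht wd _ s.1 s.2 hsh0, (hvis s).mpr rfl, ?_, ?_, ?_, ?_, ?_⟩
  · intro p hp
    rw [(hvis p).mp hp]
    exact Relation.ReflTransGen.refl
  · intro p hp
    rw [List.mem_singleton.mp hp]
    exact (hvis s).mpr rfl
  · intro p hp hnq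
    exact absurd (by rw [(hvis p).mp hp]; exact List.mem_singleton.mpr rfl) hnq
  · rw [hcnt1]; rfl
  · have hsplit := List.length_eq_length_filter_add
      (l := pvCells bo ht wd co) (fun p => pvVGet v0 p.1 p.2)
    have hlen : (pvCells bo ht wd co).length = rest.length + 1 := by rw [hC]; rfl
    unfold pvVisLen at hcnt1
    unfold pvUnvisLen
    simp only [List.length_singleton]
    omega

theorem pv_connected_eq (bo : List (List Int)) (ht wd co : Int) (s : Int × Int)
    (rest : List (Int × Int)) (hC : pvCells bo ht wd co = s :: rest) :
    ∃ vf, pvConnectedCount bo ht wd co = (pvVisLen bo ht wd co vf : Int) ∧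
      (∀ p, (p ∈ pvCells bo ht wd co ∧ pvVGet vf p.1 p.2 = true)
        ↔ pvReach bo ht wd co s p) := by
  have hs : s ∈ pvCells bo ht wd co := by rw [hC]; exact List.mem_cons_self
  have hrun := pv_bfs_run bo ht wd co s hs (rest.length + 2)
    (pvVSet (List.replicate ht.toNat (List.replicate wd.toNat false)) s.1 s.2) [s] 1
    (pv_init bo ht wd co s rest hC)
  obtain ⟨vf, hval, hchar⟩ := hrun
  refine ⟨vf, ?_, hchar⟩
  rw [← hval]
  unfold pvConnectedCount
  simp only [pv_scan_eq, hC, List.head?_cons, List.length_cons]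
  rw [if_neg (by push_cast; omega)]
  norm_num

-- ---- B's saturation rounds ----

theorem pv_round_cons (a : Int × Int) (t m : List (Int × Int)) :
    pvRound (a :: t) m = pvRound t
      (if (a.1 - 1, a.2) ∈ m ∨ (a.1 + 1, a.2) ∈ m ∨ (a.1, a.2 - 1) ∈ m ∨ (a.1, a.2 + 1) ∈ m
       then PySem.Set.add m a else m) := rfl

theorem pv_step_mem (m : List (Int × Int)) (a x : Int × Int) (hx : x ∈ m) :
    x ∈ (if (a.1 - 1, a.2) ∈ m ∨ (a.1 + 1, a.2) ∈ m ∨ (a.1, a.2 - 1) ∈ m ∨ (a.1, a.2 + 1) ∈ m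
      then PySem.Set.add m a else m) := by
  split_ifs
  · exact (PySem.Set.mem_add _ _ _).mpr (Or.inl hx)
  · exact hx

theorem pv_fold_add_mono (cells : List (Int × Int)) :
    ∀ (m : List (Int × Int)) (x : Int × Int), x ∈ m → x ∈ pvRound cells m := by
  induction cells with
  | nil => exact fun m x hx => hx
  | cons a t ih =>
    intro m x hx
    rw [pv_round_cons]
    exact ih _ x (pv_step_mem m a x hx)

theorem pv_round_append (cells : List (Int × Int)) :
    ∀ m : List (Int × Int), ∃ t, pvRound cells m = m ++ t := by
  induction cells with
  | nil => exact fun m => ⟨[], by simp [pvRound]⟩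
  | cons a t ih =>
    intro m
    rw [pv_round_cons]
    split_ifs with hco
    · by_cases hmem : a ∈ m
      · obtain ⟨u, hu⟩ := ih m
        rw [PySem.Set.add_of_mem hmem]
        exact ⟨u, hu⟩
      · obtain ⟨u, hu⟩ := ih (m ++ [a])
        rw [PySem.Set.add_of_not_mem hmem]
        exact ⟨[a] ++ u, by rw [hu, List.append_assoc]⟩
    · exact ih m

theorem pv_round_nodup (cells : List (Int × Int)) :
    ∀ m : List (Int × Int), m.Nodup → (pvRound cells m).Nodup := by
  induction cells with
  | nil => exact fun m hm => hm
  | cons a t ih =>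
    intro m hm
    rw [pv_round_cons]
    refine ih _ ?_
    split_ifs
    · by_cases hmem : a ∈ m
      · rw [PySem.Set.add_of_mem hmem]; exact hm
      · rw [PySem.Set.add_of_not_mem hmem]
        simp only [List.nodup_append, List.nodup_singleton]
        refine ⟨hm, trivial, ?_⟩
        intro x hx y hy
        rw [List.mem_singleton.mp hy]
        exact fun heq => hmem (heq ▸ hx)
    · exact hm

theorem pv_round_sound (bo : List (List Int)) (ht wd co : Int) (s : Int × Int)
    (hs : s ∈ pvCells bo ht wd co) (ks : List (Int × Int))
    (hks : ∀ x ∈ ks, x ∈ pvCells bo ht wd co) :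
    ∀ (m : List (Int × Int)), (∀ x ∈ m, pvReach bo ht wd co s x) →
      ∀ x ∈ pvRound ks m, pvReach bo ht wd co s x := by
  induction ks with
  | nil => exact fun m hm => hm
  | cons a t ih =>
    intro m hm
    rw [pv_round_cons]
    refine ih (fun x hx => hks x (List.mem_cons_of_mem _ hx)) _ ?_
    intro x hx
    split_ifs at hx with hco
    · rcases (PySem.Set.mem_add _ _ _).mp hx with h' | h'
      · exact hm x h'
      · subst h'
        have hxC : x ∈ pvCells bo ht wd co := hks x List.mem_cons_self
        rcases hco with hq | hq | hq | hq
        · exact (hm _ hq).tail (pv_adj_from_nbr bo ht wd co x _ hxC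
            (pv_reach_mem bo ht wd co s _ hs (hm _ hq)) (Or.inl rfl))
        · exact (hm _ hq).tail (pv_adj_from_nbr bo ht wd co x _ hxC
            (pv_reach_mem bo ht wd co s _ hs (hm _ hq)) (Or.inr (Or.inl rfl)))
        · exact (hm _ hq).tail (pv_adj_from_nbr bo ht wd co x _ hxC
            (pv_reach_mem bo ht wd co s _ hs (hm _ hq)) (Or.inr (Or.inr (Or.inl rfl))))
        · exact (hm _ hq).tail (pv_adj_from_nbr bo ht wd co x _ hxC
            (pv_reach_mem bo ht wd co s _ hs (hm _ hq)) (Or.inr (Or.inr (Or.inr rfl))))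
    · exact hm x hx

theorem pv_round_complete (cells : List (Int × Int)) :
    ∀ (m : List (Int × Int)) (p q : Int × Int), p ∈ cells → q ∈ m →
      (q = (p.1 - 1, p.2) ∨ q = (p.1 + 1, p.2) ∨ q = (p.1, p.2 - 1) ∨ q = (p.1, p.2 + 1)) →
      p ∈ pvRound cells m := by
  induction cells with
  | nil => intro m p q hp; cases hp
  | cons a t ih =>
    intro m p q hp hq hnbr
    rw [pv_round_cons]
    rcases List.mem_cons.mp hp with rfl | hpt
    · refine pv_fold_add_mono t _ p ?_
      have hco : (p.1 - 1, p.2) ∈ m ∨ (p.1 + 1, p.2) ∈ m ∨ (p.1, p.2 - 1) ∈ m ∨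
          (p.1, p.2 + 1) ∈ m := by
        rcases hnbr with h | h | h | h <;> [left; (right; left); (right; right; left);
          (right; right; right)] <;> exact h ▸ hq
      rw [if_pos hco]
      exact (PySem.Set.mem_add _ _ _).mpr (Or.inr rfl)
    · exact ih _ p q hpt (pv_step_mem m a q hq) hnbr

theorem pv_foldl_range_iterate {α : Type} (f : α → α) :
    ∀ (n : Nat) (m : α), (List.range n).foldl (fun a _ => f a) m = f^[n] m := by
  intro n
  induction n with
  | zero => intro m; rfl
  | succ k ih =>
    intro m
    rw [List.range_succ, List.foldl_append, ih, Function.iterate_succ_apply']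
    rfl

theorem pv_iter_sound (bo : List (List Int)) (ht wd co : Int) (s : Int × Int)
    (hs : s ∈ pvCells bo ht wd co) :
    ∀ (n : Nat) (x : Int × Int), x ∈ (pvRound (pvCells bo ht wd co))^[n] [s] →
      pvReach bo ht wd co s x := by
  intro n
  induction n with
  | zero =>
    intro x hx
    rw [List.mem_singleton.mp hx]
    exact Relation.ReflTransGen.refl
  | succ k ih =>
    intro x hx
    rw [Function.iterate_succ_apply'] at hx
    exact pv_round_sound bo ht wd co s hs (pvCells bo ht wd co) (fun y hy => hy) _ ih x hx

theorem pv_iter_nodup (bo : List (List Int)) (ht wd co : Int) (s : Int × Int) :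
    ∀ n : Nat, ((pvRound (pvCells bo ht wd co))^[n] [s]).Nodup := by
  intro n
  induction n with
  | zero => exact List.nodup_singleton s
  | succ k ih =>
    rw [Function.iterate_succ_apply']
    exact pv_round_nodup _ _ ih

theorem pv_iter_smem (bo : List (List Int)) (ht wd co : Int) (s : Int × Int) :
    ∀ n : Nat, s ∈ (pvRound (pvCells bo ht wd co))^[n] [s] := by
  intro n
  induction n with
  | zero => exact List.mem_singleton.mpr rfl
  | succ k ih =>
    rw [Function.iterate_succ_apply']
    exact pv_fold_add_mono _ _ s ih

theorem pv_grow (bo : List (List Int)) (ht wd co : Int) (s : Int × Int) :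
    ∀ k : Nat,
      pvRound (pvCells bo ht wd co) ((pvRound (pvCells bo ht wd co))^[k] [s])
          = (pvRound (pvCells bo ht wd co))^[k] [s] ∨
        k + 1 ≤ ((pvRound (pvCells bo ht wd co))^[k] [s]).length := by
  intro k
  induction k with
  | zero => right; simp
  | succ k ih =>
    rcases ih with hfix | hlen
    · left
      rw [Function.iterate_succ_apply', hfix, hfix]
    · obtain ⟨t, hts⟩ := pv_round_append (pvCells bo ht wd co) ((pvRound (pvCells bo ht wd co))^[k] [s])
      by_cases htn : t = []
      · left
        have hfix : pvRound (pvCells bo ht wd co) ((pvRound (pvCells bo ht wd co))^[k] [s])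
            = (pvRound (pvCells bo ht wd co))^[k] [s] := by
          rw [hts, htn, List.append_nil]
        rw [Function.iterate_succ_apply', hfix, hfix]
      · right
        rw [Function.iterate_succ_apply', hts, List.length_append]
        have := List.length_pos_of_ne_nil htn
        omega

theorem pv_final_fix (bo : List (List Int)) (ht wd co : Int) (s : Int × Int)
    (hs : s ∈ pvCells bo ht wd co) :
    pvRound (pvCells bo ht wd co)
        ((pvRound (pvCells bo ht wd co))^[(pvCells bo ht wd co).length] [s])
      = (pvRound (pvCells bo ht wd co))^[(pvCells bo ht wd co).length] [s] := by
  rcases pv_grow bo ht wd co s (pvCells bo ht wd co).length with hfix | hlen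
  · exact hfix
  · exfalso
    have hsub : (pvRound (pvCells bo ht wd co))^[(pvCells bo ht wd co).length] [s]
        ⊆ pvCells bo ht wd co := by
      intro x hx
      exact pv_reach_mem bo ht wd co s x hs (pv_iter_sound bo ht wd co s hs _ x hx)
    have hle := (List.subperm_of_subset (pv_iter_nodup bo ht wd co s _) hsub).length_le
    omega

theorem pv_iter_char (bo : List (List Int)) (ht wd co : Int) (s : Int × Int)
    (hs : s ∈ pvCells bo ht wd co) (p : Int × Int) :
    p ∈ (pvRound (pvCells bo ht wd co))^[(pvCells bo ht wd co).length] [s]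
      ↔ pvReach bo ht wd co s p := by
  constructor
  · exact pv_iter_sound bo ht wd co s hs _ p
  · intro hre
    induction hre with
    | refl => exact pv_iter_smem bo ht wd co s _
    | tail hq hadj ihq =>
      rw [← pv_final_fix bo ht wd co s hs]
      exact pv_round_complete (pvCells bo ht wd co) _ _ _ hadj.2.1 ihq
        (pv_adj_nbr bo ht wd co _ _ hadj)

theorem pv_colorOk_eq (bo : List (List Int)) (ht wd co : Int) (s : Int × Int)
    (rest : List (Int × Int)) (hC : pvCells bo ht wd co = s :: rest) :
    pvColorOk bo ht wd co
      = (((pvRound (pvCells bo ht wd co))^[(pvCells bo ht wd co).length] [s]).length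
          == (pvCells bo ht wd co).length) := by
  unfold pvColorOk
  rw [hC]
  show (((List.range (s :: rest).length).foldl
      (fun m _ => pvRound (s :: rest) m) (PySem.Set.add PySem.Set.empty s)).length
        == (s :: rest).length)
    = (((pvRound (s :: rest))^[(s :: rest).length] [s]).length == (s :: rest).length)
  have hm0 : PySem.Set.add PySem.Set.empty s = [s] :=
    PySem.Set.add_of_not_mem (List.not_mem_nil)
  rw [hm0, pv_foldl_range_iterate (pvRound (s :: rest)) (s :: rest).length [s]]

theorem pv_beq_cast (a b : Nat) : ((a : Int) == (b : Int)) = (a == b) := by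
  by_cases h : a = b
  · subst h; simp
  · have h1 : (a == b) = false := beq_eq_false_iff_ne.mpr h
    have h2 : ((a : Int) == (b : Int)) = false := beq_eq_false_iff_ne.mpr
      (fun hc => h (by exact_mod_cast hc))
    rw [h1, h2]

theorem pv_main (board : List (List Int)) (height width color : Int) :
    (pvConnectedCount board height width color == pvColorSum board height width color)
      = pvColorOk board height width color := by
  cases hC : pvCells board height width color with
  | nil =>
    have hA : pvConnectedCount board height width color = 0 := by
      unfold pvConnectedCount
      simp [pv_scan_eq, hC]
    have hS : pvColorSum board height width color = 0 := by
      rw [pv_sum_eq, hC]; rfl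
    have hB : pvColorOk board height width color = true := by
      unfold pvColorOk
      rw [hC]
    rw [hA, hS, hB]
    rfl
  | cons s rest =>
    have hs : s ∈ pvCells board height width color := by
      rw [hC]; exact List.mem_cons_self
    obtain ⟨vf, hval, hchar⟩ := pv_connected_eq board height width color s rest hC
    have hmem : ∀ x, x ∈ (pvCells board height width color).filter
        (fun p => pvVGet vf p.1 p.2) ↔
        x ∈ (pvRound (pvCells board height width color))^[(pvCells board height width color).length] [s] := by
      intro x
      rw [List.mem_filter, pv_iter_char board height width color s hs x, ← hchar x]
    have hperm := (List.perm_ext_iff_of_nodup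
      ((pv_nodup_cells board height width color).filter _)
      (pv_iter_nodup board height width color s _)).mpr hmem
    have hlen := hperm.length_eq
    rw [hval, pv_sum_eq, pv_colorOk_eq board height width color s rest hC]
    unfold pvVisLen
    rw [hlen, pv_beq_cast]

-- ===== VERDICT (by name: the statement is the Claim_ definition above) =====
theorem all_connected_py_spec : Claim_equal_all_connected_py := by
  intro board height width _ _
  unfold Spec_all_connected_py all_connected_py all_connected_py_alt
  rw [pv_main board height width 1, pv_main board height width 0]
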